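-- pv_equiv track=rewrite | github.com/HANARONE/algorithms | 07.16/04.둘만의 암호/둘만의 암호_kwak.py | solution
-- ===== SOURCE A (Python) =====
-- def alpha(a, b):
--     if a + b <= 122:
--         return (a + b)
--     else:
--         return (a + b - 97) % 26 + 97
--
-- def solution(s, skip, index):
--     answer = []
--     s_, skip_ = list(s), list(skip)
--     lens = len(s)
--     lenskip = len(skip)
--
--     for i in range(lenskip):
--         skip_[i] = ord(skip_[i])
--
--     for j in range(lens):
--         s_[j] = ord(s_[j])
--
--     for k in s_:
--         p = 0
--
--         for l in range(1, index+1):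
--             if alpha(k, l) in skip_:
--                 p += 1
--
--         answer.append(alpha(k, (index+p)))
--
--     for i in range(len(answer)):
--         answer[i] = chr(answer[i])
--
--
--     answer = ''.join(answer)
--
--     return answer
-- ===== SOURCE B (Python) =====
-- def alpha(a, b):
--     if a + b <= 122:
--         return (a + b)
--     else:
--         return (a + b - 97) % 26 + 97
--
-- def solution(s, skip, index):
--     S = set(ord(c) for c in skip)
--     full = sum(1 for r in range(26) if 97 + r in S)
--     out = []
--     for ch in s:
--         k = ord(ch)
--         t = min(index, max(0, 122 - k)) if index > 0 else 0
--         p = sum(1 for l in range(1, t + 1) if k + l in S)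
--         m = index - t
--         if m > 0:
--             p += (m // 26) * full
--             p += sum(1 for j in range(m % 26) if (k + t + 1 + j - 97) % 26 + 97 in S)
--         out.append(chr(alpha(k, index + p)))
--     return ''.join(out)
-- ===== Notes on version B (the rewrite author's own statement) =====
-- stated objective: faster
-- what changed: Instead of scanning all `index` shift steps per character with a linear list-membership test, B counts skipped letters in closed form: a short non-wrapped prefix of at most 90 steps is counted directly against a skip set, and the wrapped remainder is counted as (full cycles)//26 times the per-cycle skip count plus a remainder scan of at most 25 residues.
import Mathlib
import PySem

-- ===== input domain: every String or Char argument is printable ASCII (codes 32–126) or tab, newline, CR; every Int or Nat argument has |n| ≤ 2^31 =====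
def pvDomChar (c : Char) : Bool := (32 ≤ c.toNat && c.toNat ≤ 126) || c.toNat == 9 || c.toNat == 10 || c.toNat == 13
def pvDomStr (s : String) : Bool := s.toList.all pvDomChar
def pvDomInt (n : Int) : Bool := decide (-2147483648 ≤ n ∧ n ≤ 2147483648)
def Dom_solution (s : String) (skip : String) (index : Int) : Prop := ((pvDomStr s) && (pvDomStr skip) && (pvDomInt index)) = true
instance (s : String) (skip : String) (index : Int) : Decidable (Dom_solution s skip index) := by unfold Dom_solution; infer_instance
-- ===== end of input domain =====

-- B replaces A's per-character scan over all `index` shift steps by a closed-form count: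
-- a direct scan of the ≤ 90-step non-wrapped prefix plus (full cycles)·(per-26-cycle skip count)
-- plus a ≤ 25-step remainder scan; objective: faster.

-- ===== PORT A =====
-- helper alpha(a, b) of A
def alphaA (a : Int) (b : Int) : Int :=
  if a + b ≤ 122 then a + b else PySem.Int.mod (a + b - 97) 26 + 97

-- port of A; chr(v) is Char.ofNat v.toNat — exact since Pre_solution guarantees 0 ≤ v ≤ 122
def solution (s : String) (skip : String) (index : Int) : String :=
  let skip_ : List Int := skip.toList.map (fun c => (c.toNat : Int))   -- skip_ after the ord loop
  let s_ : List Int := s.toList.map (fun c => (c.toNat : Int))         -- s_ after the ord loop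
  let answer : List Int := s_.foldl (fun answer k =>
    let p : Int := (PySem.List.pyRange 1 (index + 1) 1).foldl
      (fun p l => if skip_.contains (alphaA k l) then p + 1 else p) 0
    answer ++ [alphaA k (index + p)]) []
  String.mk (answer.map (fun v => Char.ofNat v.toNat))

-- ===== PORT B =====
-- helper alpha(a, b) of B (Source B defines its own copy)
def alphaB (a : Int) (b : Int) : Int :=
  if a + b ≤ 122 then a + b else PySem.Int.mod (a + b - 97) 26 + 97

-- port of B; chr as in port A (exact under Pre_solution)
def solution_alt (s : String) (skip : String) (index : Int) : String :=
  let S : List Int := PySem.Set.ofList (skip.toList.map (fun c => (c.toNat : Int)))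
  let full : Int := ((PySem.List.pyRange 0 26 1).countP (fun r => S.contains (97 + r)) : Nat)
  let out : List Char := s.toList.foldl (fun out ch =>
    let k : Int := (ch.toNat : Int)
    let t : Int := if 0 < index then min index (max 0 (122 - k)) else 0
    let p0 : Int := ((PySem.List.pyRange 1 (t + 1) 1).countP (fun l => S.contains (k + l)) : Nat)
    let m : Int := index - t
    let p : Int := if 0 < m then
        p0 + PySem.Int.floordiv m 26 * full +
          ((PySem.List.pyRange 0 (PySem.Int.mod m 26) 1).countP
            (fun j => S.contains (PySem.Int.mod (k + t + 1 + j - 97) 26 + 97)) : Nat)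
      else p0
    out ++ [Char.ofNat (alphaB k (index + p)).toNat]) []
  String.mk out

-- ===== PRECONDITION & SPEC =====
-- Pre_ excludes exactly the inputs where A raises (chr of a negative code point, possible only
-- for negative index): there Python A raises ValueError (and B raises identically).
def Pre_solution (s : String) (skip : String) (index : Int) : Prop :=
  0 ≤ index ∨ ∀ c ∈ s.toList, 0 ≤ (c.toNat : Int) + index
instance (s : String) (skip : String) (index : Int) : Decidable (Pre_solution s skip index) := by
  unfold Pre_solution; infer_instance

def pvWitness_solution : String × String × Int := ("hello", "abz", 5)

def Spec_solution (s : String) (skip : String) (index : Int) (out : String) : Prop := out = solution_alt s skip index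
instance (s : String) (skip : String) (index : Int) (out : String) : Decidable (Spec_solution s skip index out) := by unfold Spec_solution; infer_instance

-- ===== CLAIM (what is proved, stated in full; the proofs are below) =====
def Claim_equal_solution : Prop := ∀ (s : String) (skip : String) (index : Int), Dom_solution s skip index → Pre_solution s skip index → Spec_solution s skip index (solution s skip index)

-- ===== LEMMAS AND PROOFS =====

-- a predicate with period 26 counted over range (26*q + r)
theorem countP_range_periodic (g : Nat → Bool) (hg : ∀ j, g (j + 26) = g j) (q r : Nat) :
    List.countP g (List.range (26 * q + r)) =
      q * List.countP g (List.range 26) + List.countP g (List.range r) := by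
  induction q with
  | zero => simp
  | succ q ih =>
      have h : 26 * (q + 1) + r = 26 + (26 * q + r) := by ring
      rw [h, List.range_add, List.countP_append, List.countP_map]
      have hcomp : (g ∘ fun x => 26 + x) = g := by
        funext j; simp only [Function.comp]; rw [Nat.add_comm 26 j, hg]
      rw [hcomp, ih]; ring

-- j ↦ (c + j) % 26 permutes the residues 0..25
theorem countP_range26_shift (q : Int → Bool) (c : Int) :
    List.countP (fun j : Nat => q ((c + (j : Int)) % 26)) (List.range 26) =
      List.countP (fun j : Nat => q ((j : Int))) (List.range 26) := by
  have h1 : List.countP (fun j : Nat => q ((c + (j : Int)) % 26)) (List.range 26) =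
      List.countP q ((List.range 26).map (fun j : Nat => (c + (j : Int)) % 26)) := by
    rw [List.countP_map]; rfl
  have h2 : List.countP (fun j : Nat => q ((j : Int))) (List.range 26) =
      List.countP q ((List.range 26).map (fun j : Nat => ((j : Int)))) := by
    rw [List.countP_map]; rfl
  rw [h1, h2]
  refine List.Perm.countP_eq q ?_
  have hn1 : ((List.range 26).map (fun j : Nat => (c + (j : Int)) % 26)).Nodup := by
    refine List.Nodup.map_on ?_ (List.nodup_range)
    intro x hx y hy hxy
    simp only [List.mem_range] at hx hy
    omega
  have hn2 : ((List.range 26).map (fun j : Nat => ((j : Int)))).Nodup := by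
    refine List.Nodup.map_on ?_ (List.nodup_range)
    intro x hx y hy hxy; exact_mod_cast hxy
  refine List.perm_of_nodup_nodup_toFinset_eq hn1 hn2 ?_
  refine Finset.eq_of_subset_of_card_le ?_ ?_
  · intro x hx
    simp only [List.mem_toFinset, List.mem_map, List.mem_range] at hx ⊢
    obtain ⟨j, hj, rfl⟩ := hx
    refine ⟨((c + (j : Int)) % 26).toNat, by omega, by omega⟩
  · rw [List.toFinset_card_of_nodup hn1, List.toFinset_card_of_nodup hn2]
    simp


-- the skip set and the skip list agree on membership
theorem contains_ofList (xs : List Int) (y : Int) :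
    List.contains (PySem.Set.ofList xs : PySem.Set Int) y = xs.contains y := by
  rw [Bool.eq_iff_iff]
  simp only [List.contains_iff_mem]
  simpa using PySem.Set.mem_ofList xs y

-- A's step-by-step skip count equals B's closed-form count
theorem count_main (S : List Int) (k index : Int) :
    ((PySem.List.pyRange 1 (index + 1) 1).foldl
        (fun p l => if S.contains (alphaA k l) then p + 1 else p) (0:Int)) =
    (let t : Int := if 0 < index then min index (max 0 (122 - k)) else 0
     let p0 : Int := ((PySem.List.pyRange 1 (t + 1) 1).countP (fun l => S.contains (k + l)) : Nat)
     let m : Int := index - t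
     if 0 < m then
       p0 + PySem.Int.floordiv m 26 *
           ((PySem.List.pyRange 0 26 1).countP (fun r => S.contains (97 + r)) : Nat) +
         ((PySem.List.pyRange 0 (PySem.Int.mod m 26) 1).countP
            (fun j => S.contains (PySem.Int.mod (k + t + 1 + j - 97) 26 + 97)) : Nat)
     else p0) := by
  rw [PySem.List.foldl_count_if]
  by_cases hidx : 0 < index
  · simp only [hidx, if_true]
    set t : Int := min index (max 0 (122 - k)) with ht
    have ht0 : 0 ≤ t := by omega
    have htidx : t ≤ index := by omega
    rw [PySem.List.pyRange_one_append 1 (t+1) (index+1) (by omega) (by omega),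
        List.countP_append]
    have hc1 : (PySem.List.pyRange 1 (t+1) 1).countP (fun l => S.contains (alphaA k l)) =
        (PySem.List.pyRange 1 (t+1) 1).countP (fun l => S.contains (k + l)) := by
      refine List.countP_congr ?_
      intro l hl
      rw [PySem.List.mem_pyRange_one] at hl
      have : k + l <= 122 := by omega
      simp [alphaA, this]
    rw [hc1]
    set m : Int := index - t with hm
    by_cases hm0 : 0 < m
    · simp only [hm0, if_true]
      have htmax : t = max 0 (122 - k) := by omega
      set M : Nat := m.toNat with hMdef
      have hmM : m = (M : Int) := by omega
      set g : Nat → Bool :=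
        fun j => S.contains (PySem.Int.mod (k + (t + 1 + (j : Int)) - 97) 26 + 97) with hgdef
      have h2eq : (PySem.List.pyRange (t+1) (index+1) 1).countP
            (fun l => S.contains (alphaA k l)) =
          M / 26 * List.countP g (List.range 26) + List.countP g (List.range (M % 26)) := by
        have hc2 : (PySem.List.pyRange (t+1) (index+1) 1).countP
              (fun l => S.contains (alphaA k l)) =
            (PySem.List.pyRange (t+1) (index+1) 1).countP
              (fun l => S.contains (PySem.Int.mod (k + l - 97) 26 + 97)) := by
          refine List.countP_congr ?_
          intro l hl
          rw [PySem.List.mem_pyRange_one] at hl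
          have h122 : ¬ (k + l <= 122) := by omega
          simp [alphaA, h122]
        rw [hc2, PySem.List.pyRange_one, List.countP_map]
        have hM : (index + 1 - (t + 1)).toNat = M := by omega
        rw [hM]
        have hcomp : ((fun l => S.contains (PySem.Int.mod (k + l - 97) 26 + 97)) ∘
            fun j : Nat => t + 1 + (j : Int)) = g := by
          funext j; simp only [Function.comp, hgdef]
        rw [hcomp]
        have hper : ∀ j, g (j + 26) = g j := by
          intro j
          simp only [hgdef]
          push_cast
          have harg : PySem.Int.mod (k + (t + 1 + ((j:Int) + 26)) - 97) 26 + 97 =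
              PySem.Int.mod (k + (t + 1 + (j:Int)) - 97) 26 + 97 := by
            rw [PySem.Int.mod_eq_emod_of_pos (by norm_num),
                PySem.Int.mod_eq_emod_of_pos (by norm_num)]
            omega
          rw [harg]
        have hsplit : M = 26 * (M / 26) + M % 26 := by omega
        conv_lhs => rw [hsplit]
        rw [countP_range_periodic g hper]
      rw [h2eq]
      have hfull : List.countP g (List.range 26) =
          List.countP (fun r => S.contains (97 + r)) (PySem.List.pyRange 0 26 1) := by
        have hpz : (PySem.List.pyRange 0 (26:Int) 1) = (List.range 26).map (fun j : Nat => (j : Int)) := by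
          exact_mod_cast PySem.List.pyRange_zero_nat 26
        rw [hpz, List.countP_map]
        have hstep : List.countP g (List.range 26) =
            List.countP (fun j : Nat =>
              (fun r : Int => S.contains (97 + r)) ((k + t + 1 - 97 + (j:Int)) % 26))
              (List.range 26) := by
          refine List.countP_congr ?_
          intro j _
          simp only [hgdef]
          rw [PySem.Int.mod_eq_emod_of_pos (by norm_num)]
          have harg : (k + (t + 1 + (j:Int)) - 97) % 26 + 97 =
              97 + (k + t + 1 - 97 + (j:Int)) % 26 := by omega
          rw [harg]
        rw [hstep, countP_range26_shift (fun r : Int => S.contains (97 + r)) (k + t + 1 - 97)]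
        refine List.countP_congr ?_
        intro j _
        simp [Function.comp]
      have hrem : List.countP g (List.range (M % 26)) =
          (PySem.List.pyRange 0 (PySem.Int.mod m 26) 1).countP
            (fun j => S.contains (PySem.Int.mod (k + t + 1 + j - 97) 26 + 97)) := by
        have hmod : PySem.Int.mod m 26 = ((M % 26 : Nat) : Int) := by
          rw [PySem.Int.mod_eq_emod_of_pos (by norm_num)]
          omega
        rw [hmod]
        rw [PySem.List.pyRange_zero_nat (M % 26), List.countP_map]
        refine List.countP_congr ?_
        intro j _
        simp only [hgdef, Function.comp]
        have harg : PySem.Int.mod (k + t + 1 + (j:Int) - 97) 26 + 97 =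
            PySem.Int.mod (k + (t + 1 + (j:Int)) - 97) 26 + 97 := by
          rw [PySem.Int.mod_eq_emod_of_pos (by norm_num),
              PySem.Int.mod_eq_emod_of_pos (by norm_num)]
          omega
        rw [harg]
      rw [hfull, hrem]
      have hdiv : PySem.Int.floordiv m 26 = ((M / 26 : Nat) : Int) := by
        rw [PySem.Int.floordiv_eq_ediv_of_pos (by norm_num)]
        omega
      rw [hdiv]
      push_cast
      ring
    · simp only [hm0, if_false]
      have : t = index := by omega
      rw [this, PySem.List.pyRange_one_eq_nil (by omega : index + 1 <= index + 1)]
      simp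
  · simp only [hidx, if_false]
    rw [PySem.List.pyRange_one_eq_nil (by omega : index + 1 <= 1),
        PySem.List.pyRange_one_eq_nil (by omega : (0:Int) + 1 <= 1)]
    have hm0 : ¬ (0 < index - 0) := by omega
    rw [if_neg hm0]
    simp


-- ===== VERDICT (by name: the statement is the Claim_ definition above) =====
theorem solution_spec : Claim_equal_solution := by
  intro s skip index _ _
  unfold Spec_solution
  show solution s skip index = solution_alt s skip index
  simp only [solution, solution_alt]
  rw [PySem.List.foldl_append_singleton_eq_map, PySem.List.foldl_append_singleton_eq_map]
  simp only [List.nil_append, List.map_map]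
  refine congrArg _ (List.map_congr_left fun c _ => ?_)
  simp only [Function.comp, contains_ofList]
  rw [count_main (skip.toList.map (fun c => (c.toNat : Int))) ((c.toNat : Int)) index]
  simp only [alphaA, alphaB]
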